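-- pv_equiv track=rewrite | github.com/SamarthEdlabadkar/gravitas. | server/scripts/API_OSD.py | custom_reverse_whitespace_cleanup
-- ===== SOURCE A (Python) =====
-- def custom_reverse_whitespace_cleanup(text: str) -> str:
--     """
--     Applies the custom whitespace cleanup logic: iterates in reverse, removing
--     all single whitespaces but preserving one in a double-whitespace sequence.
--     """
--     if not text:
--         return text
--
--     # Reverse the string and convert it to a list of characters
--     chars = list(text[::-1])
--     cleaned_chars_reverse = []
--     prev_was_whitespace = False
--     first_whitespace_removed = False
--
--     for char in chars:
--         if char == ' ':
--             if prev_was_whitespace: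
--                 # This is the second of two repeating whitespaces. Keep one.
--                 cleaned_chars_reverse.append(char)
--                 prev_was_whitespace = False
--             else:
--                 # This is the first whitespace or a single one. Remove it.
--                 if not first_whitespace_removed:
--                     first_whitespace_removed = True
--                 else:
--                     pass  # Don't append the char
--
--                 prev_was_whitespace = True
--         else:
--             # Regular character, keep it.
--             cleaned_chars_reverse.append(char)
--             prev_was_whitespace = False
--
--     # Join the reversed list and reverse it back to the original order
--     return "".join(cleaned_chars_reverse)[::-1]
-- ===== SOURCE B (Python) =====
-- def custom_reverse_whitespace_cleanup(text: str) -> str: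
--     """Forward single pass over runs: each maximal run of k spaces becomes
--     floor(k/2) spaces; every other character is kept unchanged."""
--     if not text:
--         return text
--     out = []
--     i = 0
--     n = len(text)
--     while i < n:
--         c = text[i]
--         if c == ' ':
--             j = i
--             while j < n and text[j] == ' ':
--                 j += 1
--             out.append(' ' * ((j - i) // 2))
--             i = j
--         else:
--             out.append(c)
--             i += 1
--     return ''.join(out)
-- ===== Notes on version B (the rewrite author's own statement) =====
-- stated objective: simpler
-- what changed: Replaced A's reverse-the-string pass with two boolean flags (one dead) by a single forward pass over maximal space runs that emits floor(run_length/2) spaces per run and copies every other character.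
import Mathlib
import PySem

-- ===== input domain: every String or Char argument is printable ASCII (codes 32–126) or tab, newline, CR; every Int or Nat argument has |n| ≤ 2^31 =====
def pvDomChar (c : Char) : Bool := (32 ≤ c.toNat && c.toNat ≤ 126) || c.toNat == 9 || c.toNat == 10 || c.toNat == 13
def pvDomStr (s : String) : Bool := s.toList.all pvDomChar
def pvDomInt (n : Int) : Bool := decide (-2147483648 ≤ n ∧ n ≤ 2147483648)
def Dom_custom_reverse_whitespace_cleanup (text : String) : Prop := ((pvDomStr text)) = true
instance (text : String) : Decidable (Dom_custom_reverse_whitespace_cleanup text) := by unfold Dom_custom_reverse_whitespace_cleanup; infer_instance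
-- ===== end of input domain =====

-- B replaces A's reverse pass with boolean flags by a single forward pass over
-- maximal space runs (each run of k spaces becomes k/2 spaces): simpler, same cost.

-- ===== PORT A =====
-- loop body of A: state = (cleaned_chars_reverse, prev_was_whitespace, first_whitespace_removed)
def pvStepA (st : List Char × Bool × Bool) (c : Char) : List Char × Bool × Bool :=
  let (acc, prev, first) := st
  if c = ' ' then
    if prev then (acc ++ [c], false, first)
    else (acc, true, if first then first else true)
  else (acc ++ [c], false, first)

def custom_reverse_whitespace_cleanup (text : String) : String :=
  if text = "" then text   -- `if not text: return text`
  else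
    -- chars = list(text[::-1]); the for-loop is a left fold of the loop body
    let chars := text.toList.reverse
    let st := chars.foldl pvStepA ([], false, false)
    -- "".join(cleaned_chars_reverse)[::-1]
    String.mk st.1.reverse

-- ===== PORT B =====
-- forward pass: for a space, the inner while is takeWhile (the run) / dropWhile
-- (skip to the run's end), emitting run.length / 2 spaces; otherwise emit the char.
def pvAltGo : List Char → List Char
  | [] => []
  | c :: t =>
    if h : c = ' ' then
      List.replicate ((List.takeWhile (fun x => x = ' ') (c :: t)).length / 2) ' '
        ++ pvAltGo (List.dropWhile (fun x => x = ' ') (c :: t))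
    else c :: pvAltGo t
termination_by l => l.length
decreasing_by
  · simp only [List.dropWhile_cons, h, decide_true, if_true, List.length_cons]
    have := List.length_dropWhile_le (fun x => decide (x = ' ')) t
    omega
  · simp

def custom_reverse_whitespace_cleanup_alt (text : String) : String :=
  if text = "" then text
  else String.mk (pvAltGo text.toList)

-- ===== PRECONDITION & SPEC =====
def Spec_custom_reverse_whitespace_cleanup (text : String) (out : String) : Prop := out = custom_reverse_whitespace_cleanup_alt text
instance (text : String) (out : String) : Decidable (Spec_custom_reverse_whitespace_cleanup text out) := by unfold Spec_custom_reverse_whitespace_cleanup; infer_instance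

-- ===== CLAIM (what is proved, stated in full; the proofs are below) =====
def Claim_equal_custom_reverse_whitespace_cleanup : Prop := ∀ (text : String), Dom_custom_reverse_whitespace_cleanup text → Spec_custom_reverse_whitespace_cleanup text (custom_reverse_whitespace_cleanup text)

-- ===== LEMMAS AND PROOFS =====

-- A's loop stripped of the accumulator/flag bookkeeping: the characters it emits.
def pvProcA : Bool → List Char → List Char
  | _, [] => []
  | prev, c :: t =>
    if c = ' ' then (if prev then c :: pvProcA false t else pvProcA true t)
    else c :: pvProcA false t

theorem pvFoldA_eq_procA (l : List Char) (acc : List Char) (prev first : Bool) :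
    (l.foldl pvStepA (acc, prev, first)).1 = acc ++ pvProcA prev l := by
  induction l generalizing acc prev first with
  | nil => simp [pvProcA]
  | cons c t ih =>
    by_cases hc : c = ' '
    · by_cases hp : prev = true
      · simp [pvStepA, pvProcA, hc, hp, List.foldl_cons, ih]
      · simp only [Bool.not_eq_true] at hp
        simp [pvStepA, pvProcA, hc, hp, List.foldl_cons, ih]
    · simp [pvStepA, pvProcA, hc, List.foldl_cons, ih]

theorem pvAltGo_nonspace (c : Char) (t : List Char) (hc : ¬ c = ' ') :
    pvAltGo (c :: t) = c :: pvAltGo t := by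
  rw [pvAltGo]; simp [hc]

theorem pvAltGo_space (t : List Char) :
    pvAltGo (' ' :: t) =
      List.replicate ((List.takeWhile (fun x => x = ' ') (' ' :: t)).length / 2) ' '
        ++ pvAltGo (List.dropWhile (fun x => x = ' ') (' ' :: t)) := by
  rw [pvAltGo]; simp

theorem pvAltGo_replicate (k : Nat) :
    pvAltGo (List.replicate k ' ') = List.replicate (k / 2) ' ' := by
  cases k with
  | zero => simp [pvAltGo]
  | succ n =>
    rw [List.replicate_succ, pvAltGo_space, ← List.replicate_succ]
    simp [List.takeWhile_replicate, List.dropWhile_replicate, pvAltGo]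

-- pvAltGo distributes over ++ when the junction is not space-space.
theorem pvAltGo_append (n : Nat) :
    ∀ xs ys : List Char, xs.length ≤ n →
    ¬(xs.getLast? = some ' ' ∧ ys.head? = some ' ') →
    pvAltGo (xs ++ ys) = pvAltGo xs ++ pvAltGo ys := by
  induction n with
  | zero =>
    intro xs ys hlen _
    have : xs = [] := List.eq_nil_of_length_eq_zero (Nat.le_zero.mp hlen)
    simp [this, pvAltGo]
  | succ n ih =>
    intro xs ys hlen hb
    match xs with
    | [] => simp [pvAltGo]
    | c :: t =>
      by_cases hc : c = ' '
      · subst hc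
        rcases hrest : List.dropWhile (fun x => x = ' ') (' ' :: t) with _ | ⟨r, rs⟩
        · -- xs is all spaces: its takeWhile is all of xs
          have htake : List.takeWhile (fun x => x = ' ') (' ' :: t) = ' ' :: t := by
            have h0 := List.takeWhile_append_dropWhile (p := fun x => decide (x = ' '))
              (l := ' ' :: t)
            rw [hrest] at h0; simpa using h0
          have hall : ∀ x ∈ (' ' :: t), x = ' ' := by
            intro x hx
            have := List.dropWhile_eq_nil_iff.mp hrest x hx
            simpa using this
          have hlast : (' ' :: t : List Char).getLast? = some ' ' := by
            rcases h : (' ' :: t : List Char).getLast? with _ | a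
            · simp at h
            · have ha : a ∈ (' ' :: t) := List.mem_of_getLast? h
              rw [hall a ha]
          have hy : ys.head? ≠ some ' ' := fun hy => hb ⟨hlast, hy⟩
          have hyd : List.dropWhile (fun x => x = ' ') ys = ys := by
            cases ys with
            | nil => simp
            | cons y ysr =>
              have hne : ¬ y = ' ' := by intro h; exact hy (by simp [h])
              simp [List.dropWhile_cons, hne]
          have hyt : List.takeWhile (fun x => x = ' ') ys = [] := by
            cases ys with
            | nil => simp
            | cons y ysr =>
              have hne : ¬ y = ' ' := by intro h; exact hy (by simp [h])
              simp [List.takeWhile_cons, hne]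
          rw [List.cons_append, pvAltGo_space (t ++ ys), pvAltGo_space t,
            show ' ' :: (t ++ ys) = (' ' :: t) ++ ys from rfl,
            List.takeWhile_append, List.dropWhile_append]
          rw [if_pos (by rw [htake]), if_pos (by rw [hrest]; rfl)]
          rw [htake, hrest, hyt, hyd]
          simp [pvAltGo]
        · -- xs has a non-space after its leading space run
          have hlen3 : (List.takeWhile (fun x => x = ' ') (' ' :: t)).length
              + (r :: rs : List Char).length = (' ' :: t : List Char).length := by
            conv_rhs => rw [← List.takeWhile_append_dropWhile
              (p := fun x => decide (x = ' ')) (l := ' ' :: t)]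
            rw [hrest, List.length_append]
          have htlen : ¬ (List.takeWhile (fun x => x = ' ') (' ' :: t)).length
              = (' ' :: t : List Char).length := by
            simp only [List.length_cons] at hlen3 ⊢
            omega
          have hglast : (r :: rs : List Char).getLast? = (' ' :: t : List Char).getLast? := by
            conv_rhs => rw [← List.takeWhile_append_dropWhile
              (p := fun x => decide (x = ' ')) (l := ' ' :: t), hrest]
            rw [List.getLast?_append_of_ne_nil _ (by simp)]
          have hlenr : (r :: rs : List Char).length ≤ n := by
            have hk : 0 < (List.takeWhile (fun x => x = ' ') (' ' :: t)).length := by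
              rw [List.takeWhile_cons]; simp
            simp only [List.length_cons] at hlen hlen3 ⊢
            omega
          have hb' : ¬((r :: rs : List Char).getLast? = some ' ' ∧ ys.head? = some ' ') := by
            rw [hglast]; exact hb
          rw [List.cons_append, pvAltGo_space (t ++ ys), pvAltGo_space t,
            show ' ' :: (t ++ ys) = (' ' :: t) ++ ys from rfl,
            List.takeWhile_append, List.dropWhile_append]
          rw [if_neg htlen, if_neg (by rw [hrest]; simp), hrest]
          rw [ih (r :: rs) ys hlenr hb']
          simp
      · -- non-space head: one char at a time
        rw [List.cons_append, pvAltGo_nonspace c _ hc, pvAltGo_nonspace c _ hc]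
        cases t with
        | nil => simp [pvAltGo]
        | cons d ds =>
          have hb' : ¬((d :: ds : List Char).getLast? = some ' ' ∧ ys.head? = some ' ') := by
            intro ⟨ha, hy⟩
            exact hb ⟨by rwa [List.getLast?_cons_cons], hy⟩
          have hlen' : (d :: ds : List Char).length ≤ n := by
            simp only [List.length_cons] at hlen ⊢; omega
          rw [ih (d :: ds) ys hlen' hb']
          simp

-- reversing the input reverses the output.
theorem pvAltGo_reverse (n : Nat) :
    ∀ m : List Char, m.length ≤ n → pvAltGo m = (pvAltGo m.reverse).reverse := by
  induction n with
  | zero =>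
    intro m hlen
    have : m = [] := List.eq_nil_of_length_eq_zero (Nat.le_zero.mp hlen)
    simp [this, pvAltGo]
  | succ n ih =>
    intro m hlen
    match m with
    | [] => simp [pvAltGo]
    | c :: t =>
      by_cases hc : c = ' '
      · subst hc
        set p : Char → Bool := fun x => decide (x = ' ') with hp
        have hsplit : (' ' :: t : List Char) = List.takeWhile p (' ' :: t) ++ List.dropWhile p (' ' :: t) :=
          (List.takeWhile_append_dropWhile).symm
        set run := List.takeWhile p (' ' :: t) with hrun
        set rest := List.dropWhile p (' ' :: t) with hrest
        have hruneq : run = List.replicate run.length ' ' := by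
          apply List.eq_replicate_of_mem
          intro x hx
          have := List.mem_takeWhile_imp hx
          simpa [hp] using this
        have hk : 0 < run.length := by
          rw [hrun, List.takeWhile_cons, if_pos (by simp [hp])]
          simp
        have hrestlen : rest.length ≤ n := by
          have hlen2 : (' ' :: t : List Char).length = run.length + rest.length := by
            conv_lhs => rw [hsplit]; rw [List.length_append]
          simp only [List.length_cons] at hlen hlen2
          omega
        have hboundary : ¬((rest.reverse).getLast? = some ' ' ∧ (run.reverse).head? = some ' ') := by
          intro ⟨ha, _⟩
          rw [List.getLast?_reverse] at ha
          rcases hrx : rest with _ | ⟨r, rs⟩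
          · rw [hrx] at ha; simp at ha
          · rw [hrx] at ha
            simp only [List.head?_cons, Option.some.injEq] at ha
            have : ¬ p r = true := by
              have := List.head_dropWhile_not p (l := ' ' :: t) (by rw [← hrest, hrx]; simp)
              simpa [← hrest, hrx] using this
            simp [hp, ha] at this
        have hrevrun : run.reverse = List.replicate run.length ' ' := by
          conv_lhs => rw [hruneq]
          simp
        calc pvAltGo (' ' :: t)
            = List.replicate (run.length / 2) ' ' ++ pvAltGo rest := pvAltGo_space t
          _ = (pvAltGo ((' ' :: t).reverse)).reverse := by
              rw [show ((' ' :: t : List Char)).reverse = rest.reverse ++ run.reverse by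
                conv_lhs => rw [hsplit]; rw [List.reverse_append]]
              rw [pvAltGo_append (rest.reverse.length) _ _ (le_refl _) hboundary]
              rw [hrevrun, pvAltGo_replicate]
              rw [List.reverse_append, List.reverse_replicate]
              rw [← ih rest hrestlen]
      · rw [pvAltGo_nonspace c t hc]
        have hb : ¬((t.reverse).getLast? = some ' ' ∧ ([c] : List Char).head? = some ' ') := by
          intro ⟨_, hy⟩
          simp only [List.head?_cons, Option.some.injEq] at hy
          exact hc hy
        rw [show ((c :: t : List Char)).reverse = t.reverse ++ [c] by simp]
        rw [pvAltGo_append (t.reverse.length) _ _ (le_refl _) hb]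
        rw [pvAltGo_nonspace c [] hc]
        simp only [pvAltGo, List.reverse_append, List.reverse_cons, List.reverse_nil,
          List.nil_append, List.cons_append]
        rw [← ih t (by simpa using Nat.lt_succ_iff.mp (by simpa using hlen))]

-- A's stateful pass over a leading space run.
theorem pvProcA_space_run (k : Nat) :
    ∀ rest : List Char, (rest = [] ∨ ∃ r rs, rest = r :: rs ∧ ¬ r = ' ') →
    pvProcA false (List.replicate k ' ' ++ rest) =
      List.replicate (k / 2) ' ' ++ pvProcA false rest := by
  induction k using Nat.twoStepInduction with
  | zero => intro rest _; simp
  | one =>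
    intro rest hr
    rcases hr with h | ⟨r, rs, h, hrne⟩
    · subst h; simp [pvProcA]
    · subst h
      simp only [List.replicate_succ, List.replicate_zero, List.cons_append, List.nil_append]
      rw [pvProcA]
      simp [pvProcA, hrne]
  | more k ih _ =>
    intro rest hr
    have h2 : (k + 2) / 2 = k / 2 + 1 := by omega
    rw [show List.replicate (k + 2) ' ' = ' ' :: ' ' :: List.replicate k ' ' by
      simp [List.replicate_succ]]
    simp only [List.cons_append]
    rw [pvProcA]; simp only [if_pos rfl, if_neg (by simp : ¬ (false = true))]
    rw [pvProcA]; simp only [if_pos rfl, if_pos rfl]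
    rw [ih rest hr, h2, List.replicate_succ]
    simp

-- A's pass equals B's run pass.
theorem pvProcA_eq_pvAltGo (n : Nat) :
    ∀ l : List Char, l.length ≤ n → pvProcA false l = pvAltGo l := by
  induction n with
  | zero =>
    intro l hlen
    have : l = [] := List.eq_nil_of_length_eq_zero (Nat.le_zero.mp hlen)
    simp [this, pvProcA, pvAltGo]
  | succ n ih =>
    intro l hlen
    match l with
    | [] => simp [pvProcA, pvAltGo]
    | c :: t =>
      by_cases hc : c = ' '
      · subst hc
        set p : Char → Bool := fun x => decide (x = ' ') with hp
        set run := List.takeWhile p (' ' :: t) with hrun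
        set rest := List.dropWhile p (' ' :: t) with hrest
        have hsplit : (' ' :: t : List Char) = run ++ rest :=
          (List.takeWhile_append_dropWhile).symm
        have hruneq : run = List.replicate run.length ' ' := by
          apply List.eq_replicate_of_mem
          intro x hx
          have := List.mem_takeWhile_imp hx
          simpa [hp] using this
        have hk : 0 < run.length := by
          rw [hrun, List.takeWhile_cons, if_pos (by simp [hp])]
          simp
        have hrestlen : rest.length ≤ n := by
          have hlen2 : (' ' :: t : List Char).length = run.length + rest.length := by
            conv_lhs => rw [hsplit]; rw [List.length_append]
          simp only [List.length_cons] at hlen hlen2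
          omega
        have hshape : rest = [] ∨ ∃ r rs, rest = r :: rs ∧ ¬ r = ' ' := by
          rcases hrx : rest with _ | ⟨r, rs⟩
          · exact Or.inl rfl
          · refine Or.inr ⟨r, rs, rfl, ?_⟩
            have := List.head_dropWhile_not p (l := ' ' :: t) (by rw [← hrest, hrx]; simp)
            simp only [← hrest, hrx, List.head_cons] at this
            simpa [hp] using this
        calc pvProcA false (' ' :: t)
            = pvProcA false (List.replicate run.length ' ' ++ rest) := by
              conv_lhs => rw [hsplit, hruneq]
          _ = List.replicate (run.length / 2) ' ' ++ pvProcA false rest :=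
              pvProcA_space_run run.length rest hshape
          _ = List.replicate (run.length / 2) ' ' ++ pvAltGo rest := by
              rw [ih rest hrestlen]
          _ = pvAltGo (' ' :: t) := (pvAltGo_space t).symm
      · rw [pvAltGo_nonspace c t hc, pvProcA]
        simp only [if_neg hc]
        rw [ih t (by simpa using Nat.lt_succ_iff.mp (by simpa using hlen))]

-- ===== VERDICT (by name: the statement is the Claim_ definition above) =====
theorem custom_reverse_whitespace_cleanup_spec : Claim_equal_custom_reverse_whitespace_cleanup := by
  intro text _
  unfold Spec_custom_reverse_whitespace_cleanup
  unfold custom_reverse_whitespace_cleanup custom_reverse_whitespace_cleanup_alt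
  by_cases h : text = ""
  · simp [h]
  · simp only [if_neg h]
    rw [pvFoldA_eq_procA]
    rw [List.nil_append]
    rw [pvProcA_eq_pvAltGo (text.toList.reverse.length) _ (le_refl _)]
    rw [← pvAltGo_reverse (text.toList.length) text.toList (le_refl _)]
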